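-- pv_equiv track=rewrite | github.com/jeongyeonpark/biodata-utils | pdb_fasta_extractor.py | is_histag
-- ===== SOURCE A (Python) =====
-- def is_histag(icode_entries: list[tuple]) -> bool:
--     """Return True if insertion-code residues contain >= 4 consecutive HIS residues.
--
--     [BUG-1] 기존 코드는 총 HIS 개수만 세었으나, His-tag는 연속된 HIS 잔기를
--     의미하므로 연속 런(run) 길이로 판별하도록 수정.
--     """
--     max_run = cur = 0
--     for _, _, aa, _ in icode_entries:
--         if aa == "H":
--             cur += 1
--             max_run = max(max_run, cur)
--         else:
--             cur = 0
--     return max_run >= 4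
-- ===== SOURCE B (Python) =====
-- def is_histag(icode_entries: list[tuple]) -> bool:
--     """Return True if insertion-code residues contain >= 4 consecutive HIS residues."""
--     sentinel = ''.join('H' if aa == 'H' else '.' for _, _, aa, _ in icode_entries)
--     return 'HHHH' in sentinel
-- ===== Notes on version B (the rewrite author's own statement) =====
-- stated objective: idiomatic
-- what changed: replaces the running max_run/cur counter loop with a map to a one-char-per-entry sentinel string and a 'HHHH' substring test
import Mathlib
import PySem

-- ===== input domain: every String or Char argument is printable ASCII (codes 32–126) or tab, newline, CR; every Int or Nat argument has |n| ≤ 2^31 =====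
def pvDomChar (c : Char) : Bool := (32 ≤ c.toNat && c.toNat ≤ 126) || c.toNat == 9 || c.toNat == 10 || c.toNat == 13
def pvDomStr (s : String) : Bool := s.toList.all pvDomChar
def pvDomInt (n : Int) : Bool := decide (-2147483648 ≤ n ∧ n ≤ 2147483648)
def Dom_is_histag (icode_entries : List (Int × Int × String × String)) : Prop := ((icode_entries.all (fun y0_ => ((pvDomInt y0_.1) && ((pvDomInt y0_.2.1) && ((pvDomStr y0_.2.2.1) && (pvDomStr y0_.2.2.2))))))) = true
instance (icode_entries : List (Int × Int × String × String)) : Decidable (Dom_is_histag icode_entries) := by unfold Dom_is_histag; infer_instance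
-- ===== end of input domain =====

-- B replaces A's running max_run/cur counters with a one-char-per-entry sentinel string and a 'HHHH' substring test (idiomatic; same cost).

-- ===== PORT A =====
-- for loop over entries keeping (max_run, cur); return max_run >= 4
def is_histag (icode_entries : List (Int × Int × String × String)) : Bool :=
  let s := icode_entries.foldl
    (fun (st : Int × Int) e =>
      if e.2.2.1 == "H" then (max st.1 (st.2 + 1), st.2 + 1) else (st.1, 0))
    (0, 0)
  decide (s.1 ≥ 4)

-- ===== PORT B =====
-- sentinel = ''.join('H' if aa == 'H' else '.' for _, _, aa, _ in icode_entries); return 'HHHH' in sentinel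
def is_histag_alt (icode_entries : List (Int × Int × String × String)) : Bool :=
  let sentinel := String.ofList (icode_entries.map (fun e => if e.2.2.1 == "H" then 'H' else '.'))
  PySem.Str.isIn "HHHH" sentinel

-- ===== PRECONDITION & SPEC =====
def Spec_is_histag (icode_entries : List (Int × Int × String × String)) (out : Bool) : Prop := out = is_histag_alt icode_entries
instance (icode_entries : List (Int × Int × String × String)) (out : Bool) : Decidable (Spec_is_histag icode_entries out) := by unfold Spec_is_histag; infer_instance

-- ===== CLAIM (what is proved, stated in full; the proofs are below) =====
def Claim_equal_is_histag : Prop := ∀ (icode_entries : List (Int × Int × String × String)), Dom_is_histag icode_entries → Spec_is_histag icode_entries (is_histag icode_entries)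

-- ===== LEMMAS AND PROOFS =====

-- reference checker: scan the sentinel chars with the current run length `cur`
def pvCheck : List Char → Int → Bool
  | [], _ => false
  | c :: t, cur => if c = 'H' then (decide (cur + 1 ≥ 4) || pvCheck t (cur + 1)) else pvCheck t 0

theorem pvFold_eq_check (l : List (Int × Int × String × String)) :
    ∀ (m cur : Int),
    decide ((l.foldl (fun (st : Int × Int) e =>
        if e.2.2.1 == "H" then (max st.1 (st.2 + 1), st.2 + 1) else (st.1, 0)) (m, cur)).1 ≥ 4)
      = (decide (m ≥ 4) || pvCheck (l.map (fun e => if e.2.2.1 == "H" then 'H' else '.')) cur) := by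
  induction l with
  | nil => intro m cur; simp [pvCheck]
  | cons e t ih =>
    intro m cur
    by_cases h : e.2.2.1 == "H"
    · simp only [List.foldl_cons, List.map_cons, h, if_true, pvCheck]
      rw [ih]
      rcases Decidable.em (m ≥ 4) with hm | hm <;>
      rcases Decidable.em (cur + 1 ≥ 4) with hc | hc <;>
        simp [hm, hc]
    · have h' : (if e.2.2.1 == "H" then 'H' else '.') = '.' := by simp [h]
      simp only [List.foldl_cons, List.map_cons, h, Bool.false_eq_true, if_false]
      rw [ih]
      simp [pvCheck]

theorem replicate_prefix_replicate {c : Char} {m n : Nat} (h : m ≤ n) :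
    List.replicate m c <+: List.replicate n c := by
  have : List.replicate m c = (List.replicate n c).take m := by
    rw [List.take_replicate]; simp [Nat.min_eq_left h]
  rw [this]; exact List.take_prefix _ _

theorem pvCheck_iff_infix (cs : List Char) :
    ∀ (cur : Int), 0 ≤ cur → cur < 4 →
    (pvCheck cs cur = true ↔
      (List.replicate (4 - cur).toNat 'H' <+: cs ∨ ['H','H','H','H'] <:+: cs)) := by
  induction cs with
  | nil =>
    intro cur h0 h4
    constructor
    · intro h; simp [pvCheck] at h
    · rintro (h | h)
      · exfalso
        have := h.length_le
        simp at this
        omega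
      · exfalso
        have := h.length_le
        simp at this
  | cons c t ih =>
    intro cur h0 h4
    by_cases hc : c = 'H'
    · subst hc
      by_cases hb : cur + 1 ≥ 4
      · have hcur : cur = 3 := by omega
        subst hcur
        constructor
        · intro _
          left
          show List.replicate ((4 - (3:Int)).toNat) 'H' <+: 'H' :: t
          have : ((4:Int) - 3).toNat = 1 := by decide
          rw [this]
          simp
        · intro _
          simp [pvCheck]
      · have h1 : (4 - cur).toNat = (4 - (cur + 1)).toNat + 1 := by omega
        have hstep : pvCheck ('H' :: t) cur = pvCheck t (cur + 1) := by
          simp [pvCheck, hb]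
        rw [hstep, ih (cur + 1) (by omega) (by omega), h1]
        constructor
        · rintro (h | h)
          · left
            rw [List.replicate_succ]
            exact List.cons_prefix_cons.mpr ⟨rfl, h⟩
          · right
            exact List.infix_cons_iff.mpr (Or.inr h)
        · rintro (h | h)
          · rw [List.replicate_succ] at h
            left
            exact (List.cons_prefix_cons.mp h).2
          · rcases (List.infix_cons_iff.mp h) with h | h
            · have h3 : (['H','H','H','H'] : List Char) = 'H' :: List.replicate 3 'H' := by decide
              rw [h3] at h
              have hp : List.replicate 3 'H' <+: t := (List.cons_prefix_cons.mp h).2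
              left
              exact (replicate_prefix_replicate (c := 'H') (by omega)).trans hp
            · right; exact h
    · have hstep : pvCheck (c :: t) cur = pvCheck t 0 := by
        simp [pvCheck, hc]
      rw [hstep, ih 0 le_rfl (by omega)]
      have hrep4 : (['H','H','H','H'] : List Char) = List.replicate ((4:Int) - 0).toNat 'H' := by decide
      constructor
      · rintro (h | h)
        · right
          rw [hrep4]
          exact List.infix_cons_iff.mpr (Or.inr h.isInfix)
        · right
          exact List.infix_cons_iff.mpr (Or.inr h)
      · rintro (h | h)
        · exfalso
          obtain ⟨k, hk⟩ : ∃ k, (4 - cur).toNat = k + 1 := ⟨(4 - cur).toNat - 1, by omega⟩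
          rw [hk, List.replicate_succ, List.cons_prefix_cons] at h
          exact hc h.1.symm
        · rcases List.infix_cons_iff.mp h with h | h
          · exfalso
            rw [List.cons_prefix_cons] at h
            exact hc h.1.symm
          · right; exact h

-- ===== VERDICT (by name: the statement is the Claim_ definition above) =====
theorem is_histag_spec : Claim_equal_is_histag := by
  intro l _
  show is_histag l = is_histag_alt l
  unfold is_histag is_histag_alt
  rw [pvFold_eq_check]
  simp only [ge_iff_le, show ¬ (4:Int) ≤ 0 by omega, decide_false, Bool.false_or]
  rw [Bool.eq_iff_iff, pvCheck_iff_infix _ 0 le_rfl (by omega), PySem.Str.isIn_iff_infix]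
  have h4 : ((4 : Int) - 0).toNat = 4 := by decide
  have hrep : List.replicate 4 'H' = (['H','H','H','H'] : List Char) := by decide
  have hs : "HHHH".toList = (['H','H','H','H'] : List Char) := by decide
  rw [h4, hrep, hs, String.toList_ofList]
  constructor
  · rintro (h | h)
    · exact h.isInfix
    · exact h
  · intro h; right; exact h
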